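-- pv_equiv track=rewrite | github.com/ulle73/openclaw | scripts/youtube_synthesis.py | idea_shape
-- ===== SOURCE A (Python) =====
-- def idea_shape(categories: list[str]) -> tuple[str, str]:
--     if any(category in categories for category in ["automation", "workflow", "agent_flow", "api", "mcp"]):
--         return "automation", "Bygg ett repeterbart arbetsflode eller en skill"
--     if any(category in categories for category in ["product_opportunity", "business_idea", "app_idea"]):
--         return "offer", "Paketera detta som ett testbart erbjudande eller produktspår"
--     if "seo_distribution" in categories:
--         return "distribution", "Anvand detta for content, SEO och distributionshastighet"
--     return "monitor", "Bevaka temat och samla mer bevis innan du agerar"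
-- ===== SOURCE B (Python) =====
-- _TABLE = {
--     "automation": (0, "automation", "Bygg ett repeterbart arbetsflode eller en skill"),
--     "workflow": (0, "automation", "Bygg ett repeterbart arbetsflode eller en skill"),
--     "agent_flow": (0, "automation", "Bygg ett repeterbart arbetsflode eller en skill"),
--     "api": (0, "automation", "Bygg ett repeterbart arbetsflode eller en skill"),
--     "mcp": (0, "automation", "Bygg ett repeterbart arbetsflode eller en skill"),
--     "product_opportunity": (1, "offer", "Paketera detta som ett testbart erbjudande eller produktspår"),
--     "business_idea": (1, "offer", "Paketera detta som ett testbart erbjudande eller produktspår"),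
--     "app_idea": (1, "offer", "Paketera detta som ett testbart erbjudande eller produktspår"),
--     "seo_distribution": (2, "distribution", "Anvand detta for content, SEO och distributionshastighet"),
-- }
--
--
-- def idea_shape(categories: list[str]) -> tuple[str, str]:
--     best = None
--     for c in categories:
--         e = _TABLE.get(c)
--         if e is not None and (best is None or e[0] < best[0]):
--             best = e
--     if best is None:
--         return "monitor", "Bevaka temat och samla mer bevis innan du agerar"
--     return best[1], best[2]
-- ===== Notes on version B (the rewrite author's own statement) =====
-- stated objective: idiomatic
-- what changed: Replaces the three fixed-group membership scans over the input with one precomputed category->(rank,label,advice) table and a single pass over the input keeping the minimum-rank entry.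
import Mathlib
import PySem

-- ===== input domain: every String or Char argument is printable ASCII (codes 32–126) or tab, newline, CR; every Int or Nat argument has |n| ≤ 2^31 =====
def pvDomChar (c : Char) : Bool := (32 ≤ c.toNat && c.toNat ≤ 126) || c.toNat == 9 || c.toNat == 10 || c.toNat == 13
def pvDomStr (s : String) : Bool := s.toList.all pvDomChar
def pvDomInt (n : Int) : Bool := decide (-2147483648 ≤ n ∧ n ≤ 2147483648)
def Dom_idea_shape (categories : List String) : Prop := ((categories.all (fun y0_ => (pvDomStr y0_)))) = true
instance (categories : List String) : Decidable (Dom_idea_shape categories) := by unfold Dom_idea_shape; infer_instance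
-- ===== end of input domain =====

-- B replaces A's three fixed-group membership scans with one precomputed category→(rank,label,advice) table and a single pass keeping the minimum-rank entry (idiomatic; not claimed faster).

-- shared string constants (advice / label texts used verbatim by both programs)
def advAuto : String := "Bygg ett repeterbart arbetsflode eller en skill"
def advOffer : String := "Paketera detta som ett testbart erbjudande eller produktspår"
def advDist : String := "Anvand detta for content, SEO och distributionshastighet"
def advMon : String := "Bevaka temat och samla mer bevis innan du agerar"

-- ===== PORT A =====
def idea_shape (categories : List String) : String × String :=
  if (["automation", "workflow", "agent_flow", "api", "mcp"].any
        (fun category => categories.contains category)) then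
    ("automation", advAuto)
  else if (["product_opportunity", "business_idea", "app_idea"].any
        (fun category => categories.contains category)) then
    ("offer", advOffer)
  else if categories.contains "seo_distribution" then
    ("distribution", advDist)
  else
    ("monitor", advMon)

-- ===== PORT B =====
def tableB : PySem.Dict String (Int × String × String) :=
  PySem.Dict.ofList
    [("automation", (0, "automation", advAuto)),
     ("workflow", (0, "automation", advAuto)),
     ("agent_flow", (0, "automation", advAuto)),
     ("api", (0, "automation", advAuto)),
     ("mcp", (0, "automation", advAuto)),
     ("product_opportunity", (1, "offer", advOffer)),
     ("business_idea", (1, "offer", advOffer)),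
     ("app_idea", (1, "offer", advOffer)),
     ("seo_distribution", (2, "distribution", advDist))]

def stepB (best : Option (Int × String × String)) (c : String) : Option (Int × String × String) :=
  match tableB.get? c with
  | none => best
  | some e =>
    match best with
    | none => some e
    | some b => if e.1 < b.1 then some e else some b

def idea_shape_alt (categories : List String) : String × String :=
  match categories.foldl stepB none with
  | none => ("monitor", advMon)
  | some b => (b.2.1, b.2.2)

-- ===== PRECONDITION & SPEC =====
def Spec_idea_shape (categories : List String) (out : String × String) : Prop := out = idea_shape_alt categories
instance (categories : List String) (out : String × String) : Decidable (Spec_idea_shape categories out) := by unfold Spec_idea_shape; infer_instance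

-- ===== CLAIM (what is proved, stated in full; the proofs are below) =====
def Claim_equal_idea_shape : Prop := ∀ (categories : List String), Dom_idea_shape categories → Spec_idea_shape categories (idea_shape categories)

-- ===== LEMMAS AND PROOFS =====

-- the three table entries
def t0 : Int × String × String := (0, "automation", advAuto)
def t1 : Int × String × String := (1, "offer", advOffer)
def t2 : Int × String × String := (2, "distribution", advDist)

-- rank-indexed view of the reachable accumulator states (3 = no entry yet)
def ofR (k : Int) : Option (Int × String × String) :=
  if k = 0 then some t0 else if k = 1 then some t1 else if k = 2 then some t2 else none

def rankC (c : String) : Int :=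
  match tableB.get? c with
  | none => 3
  | some e => e.1

-- membership conditions for the three groups
abbrev P0 (cs : List String) : Prop :=
  ∃ c ∈ cs, c = "automation" ∨ c = "workflow" ∨ c = "agent_flow" ∨ c = "api" ∨ c = "mcp"
abbrev P1 (cs : List String) : Prop :=
  ∃ c ∈ cs, c = "product_opportunity" ∨ c = "business_idea" ∨ c = "app_idea"
abbrev P2 (cs : List String) : Prop := "seo_distribution" ∈ cs

lemma tget (c : String) : tableB.get? c =
    if c = "automation" ∨ c = "workflow" ∨ c = "agent_flow" ∨ c = "api" ∨ c = "mcp" then some t0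
    else if c = "product_opportunity" ∨ c = "business_idea" ∨ c = "app_idea" then some t1
    else if c = "seo_distribution" then some t2
    else none := by
  by_cases h1 : c = "automation"
  · subst h1; rfl
  by_cases h2 : c = "workflow"
  · subst h2; rfl
  by_cases h3 : c = "agent_flow"
  · subst h3; rfl
  by_cases h4 : c = "api"
  · subst h4; rfl
  by_cases h5 : c = "mcp"
  · subst h5; rfl
  by_cases h6 : c = "product_opportunity"
  · subst h6; rfl
  by_cases h7 : c = "business_idea"
  · subst h7; rfl
  by_cases h8 : c = "app_idea"
  · subst h8; rfl
  by_cases h9 : c = "seo_distribution"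
  · subst h9; rfl
  rw [if_neg (by tauto), if_neg (by tauto), if_neg h9]
  have htab : tableB = PySem.Dict.mk
    [("automation", t0), ("workflow", t0), ("agent_flow", t0), ("api", t0), ("mcp", t0),
     ("product_opportunity", t1), ("business_idea", t1), ("app_idea", t1),
     ("seo_distribution", t2)] := by rfl
  rw [htab]
  simp only [PySem.Dict.get?_mk_cons, beq_iff_eq]
  rw [if_neg (fun h => h1 h.symm), if_neg (fun h => h2 h.symm), if_neg (fun h => h3 h.symm),
      if_neg (fun h => h4 h.symm), if_neg (fun h => h5 h.symm), if_neg (fun h => h6 h.symm),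
      if_neg (fun h => h7 h.symm), if_neg (fun h => h8 h.symm), if_neg (fun h => h9 h.symm)]
  rfl

lemma rankC_char (c : String) : rankC c =
    if c = "automation" ∨ c = "workflow" ∨ c = "agent_flow" ∨ c = "api" ∨ c = "mcp" then 0
    else if c = "product_opportunity" ∨ c = "business_idea" ∨ c = "app_idea" then 1
    else if c = "seo_distribution" then 2
    else 3 := by
  unfold rankC; rw [tget]; split_ifs <;> rfl

lemma rankC_bounds (c : String) : 0 ≤ rankC c ∧ rankC c ≤ 3 := by
  rw [rankC_char]; split_ifs <;> omega

lemma step_ofR (k : Int) (c : String) (h0 : 0 ≤ k) (h3 : k ≤ 3) :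
    stepB (ofR k) c = ofR (min k (rankC c)) := by
  unfold stepB rankC
  rw [tget]
  split_ifs with ha hb hc <;> unfold ofR <;> interval_cases k <;>
    simp [t0, t1, t2]

-- minimum rank of a list, as B's fold computes it
def mr (k : Int) (cs : List String) : Int := cs.foldl (fun m c => min m (rankC c)) k

lemma mr_min (cs : List String) : ∀ k j : Int, mr (min k j) cs = min k (mr j cs) := by
  induction cs with
  | nil => intro k j; rfl
  | cons c cs ih =>
      intro k j
      show mr (min (min k j) (rankC c)) cs = min k (mr (min j (rankC c)) cs)
      rw [min_assoc, ih]

lemma mr_cons (c : String) (cs : List String) : mr 3 (c :: cs) = min (rankC c) (mr 3 cs) := by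
  show mr (min 3 (rankC c)) cs = _
  rw [min_comm, mr_min]

lemma foldB_ofR (cs : List String) : ∀ k : Int, 0 ≤ k → k ≤ 3 →
    List.foldl stepB (ofR k) cs = ofR (mr k cs) := by
  induction cs with
  | nil => intro k _ _; rfl
  | cons c cs ih =>
      intro k h0 h3
      have hb := rankC_bounds c
      show List.foldl stepB (stepB (ofR k) c) cs = ofR (mr (min k (rankC c)) cs)
      rw [step_ofR k c h0 h3, ih (min k (rankC c)) (by omega) (by omega)]

lemma mr_char (cs : List String) :
    mr 3 cs = if P0 cs then 0 else if P1 cs then 1 else if P2 cs then 2 else 3 := by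
  induction cs with
  | nil => simp [mr, P0, P1, P2]
  | cons c cs ih =>
      rw [mr_cons, ih, rankC_char]
      have h0 : P0 (c :: cs) ↔ (c = "automation" ∨ c = "workflow" ∨ c = "agent_flow" ∨
          c = "api" ∨ c = "mcp") ∨ P0 cs := by unfold P0; simp
      have h1 : P1 (c :: cs) ↔ (c = "product_opportunity" ∨ c = "business_idea" ∨
          c = "app_idea") ∨ P1 cs := by unfold P1; simp
      have h2 : P2 (c :: cs) ↔ c = "seo_distribution" ∨ P2 cs := by unfold P2; simp [eq_comm]
      split_ifs with a b d e f g <;> simp_all [P0, P1, P2] <;> aesop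

lemma condA0 (cs : List String) :
    (["automation", "workflow", "agent_flow", "api", "mcp"].any
      (fun category => cs.contains category)) = true ↔ P0 cs := by
  unfold P0
  simp only [List.any_eq_true, List.contains_iff_mem, List.mem_cons]
  constructor
  · rintro ⟨x, hx, hy⟩; exact ⟨x, hy, by simpa using hx⟩
  · rintro ⟨x, hx, hy⟩; exact ⟨x, by simpa using hy, hx⟩

lemma condA1 (cs : List String) :
    (["product_opportunity", "business_idea", "app_idea"].any
      (fun category => cs.contains category)) = true ↔ P1 cs := by
  unfold P1
  simp only [List.any_eq_true, List.contains_iff_mem, List.mem_cons]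
  constructor
  · rintro ⟨x, hx, hy⟩; exact ⟨x, hy, by simpa using hx⟩
  · rintro ⟨x, hx, hy⟩; exact ⟨x, by simpa using hy, hx⟩

lemma alt_char (cs : List String) :
    idea_shape_alt cs =
      if P0 cs then ("automation", advAuto)
      else if P1 cs then ("offer", advOffer)
      else if P2 cs then ("distribution", advDist)
      else ("monitor", advMon) := by
  unfold idea_shape_alt
  have hnone : (none : Option (Int × String × String)) = ofR 3 := by rfl
  rw [hnone, foldB_ofR cs 3 (by omega) (by omega), mr_char]
  split_ifs <;> rfl

-- ===== VERDICT (by name: the statement is the Claim_ definition above) =====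
theorem idea_shape_spec : Claim_equal_idea_shape := by
  intro cs _
  unfold Spec_idea_shape idea_shape
  rw [alt_char]
  by_cases h0 : P0 cs
  · rw [if_pos ((condA0 cs).mpr h0), if_pos h0]
  · rw [if_neg (fun h => h0 ((condA0 cs).mp h)), if_neg h0]
    by_cases h1 : P1 cs
    · rw [if_pos ((condA1 cs).mpr h1), if_pos h1]
    · rw [if_neg (fun h => h1 ((condA1 cs).mp h)), if_neg h1]
      by_cases h2 : P2 cs
      · rw [if_pos (by simpa [List.contains_iff_mem] using h2), if_pos h2]
      · rw [if_neg (by simpa [List.contains_iff_mem] using h2), if_neg h2]
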